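-- pv_equiv track=rewrite | github.com/cs-ubbcluj-ro/FP-2021-2022 | src/lecture/livecoding/lecture_12.py | product_rec
-- ===== SOURCE A (Python) =====
-- def product_rec(data, start, end):
--     if start == end:
--         if start % 2 == 0 and data[start] % 2 == 0:
--             return data[start]
--         else:
--             return 1
--
--     middle = (start + end) // 2
--     return product_rec(data, start, middle) * product_rec(data, middle + 1, end)
-- ===== SOURCE B (Python) =====
-- def product_rec(data, start, end):
--     result = 1
--     for i in range(start, end + 1):
--         if i % 2 == 0 and data[i] % 2 == 0:
--             result *= data[i]
--     return result
-- ===== Notes on version B (the rewrite author's own statement) =====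
-- stated objective: simpler
-- what changed: Replaces the balanced divide-and-conquer recursion with a single left-to-right loop over range(start, end+1) that multiplies an accumulator by each even element at an even index.
import Mathlib
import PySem

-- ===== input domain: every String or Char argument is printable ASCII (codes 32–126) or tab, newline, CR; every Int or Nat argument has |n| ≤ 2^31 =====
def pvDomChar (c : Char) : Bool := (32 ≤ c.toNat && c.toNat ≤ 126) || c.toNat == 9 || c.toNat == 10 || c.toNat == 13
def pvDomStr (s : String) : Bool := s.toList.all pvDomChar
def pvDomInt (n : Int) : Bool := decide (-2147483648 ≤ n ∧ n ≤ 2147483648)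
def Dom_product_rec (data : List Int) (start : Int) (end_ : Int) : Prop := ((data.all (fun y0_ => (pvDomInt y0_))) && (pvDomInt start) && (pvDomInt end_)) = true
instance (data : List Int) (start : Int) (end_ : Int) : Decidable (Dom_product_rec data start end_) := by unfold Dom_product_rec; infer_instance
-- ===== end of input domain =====

-- B replaces A's balanced divide-and-conquer recursion with a single left-to-right
-- accumulator loop over range(start, end+1); same value, simpler structure.


-- ===== PORT A =====
-- Fuel makes the recursion total; inside Pre_ (start ≤ end_) the fuel used by
-- product_rec is never exhausted, so the fuel-0 branch is unreachable there.
-- data[i] is ported as pyGet? (Python negative-index rule); its `none` case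
-- (IndexError) is outside Pre_, where .getD 1 is an arbitrary total default.
def productRecAux (data : List Int) : Nat → Int → Int → Int
  | 0, _, _ => 1
  | fuel + 1, start, end_ =>
    if start = end_ then
      if PySem.Int.mod start 2 = 0 ∧ PySem.Int.mod ((PySem.List.pyGet? data start).getD 1) 2 = 0 then
        (PySem.List.pyGet? data start).getD 1
      else 1
    else
      let middle := PySem.Int.floordiv (start + end_) 2
      productRecAux data fuel start middle * productRecAux data fuel (middle + 1) end_

def product_rec (data : List Int) (start : Int) (end_ : Int) : Int :=
  productRecAux data ((end_ - start).toNat + 1) start end_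

-- ===== PORT B =====
def product_rec_alt (data : List Int) (start : Int) (end_ : Int) : Int :=
  (PySem.List.pyRange start (end_ + 1) 1).foldl
    (fun result i =>
      if PySem.Int.mod i 2 = 0 ∧ PySem.Int.mod ((PySem.List.pyGet? data i).getD 1) 2 = 0 then
        result * (PySem.List.pyGet? data i).getD 1
      else result)
    1

-- ===== PRECONDITION & SPEC =====
-- Pre_ excludes exactly the inputs on which the Python A raises:
-- start > end_ (unbounded recursion, RecursionError), and any EVEN index in
-- [start, end_] outside Python's valid (possibly negative) range (IndexError;
-- odd indices are never read thanks to the short-circuit `and`).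
-- firstEven/lastEven are the least/greatest even index of [start, end_]; the
-- interval's even indices are all valid iff both of them are (or none exist).
def Pre_product_rec (data : List Int) (start : Int) (end_ : Int) : Prop :=
  start ≤ end_ ∧
    (let firstEven : Int := if start % 2 = 0 then start else start + 1
     let lastEven : Int := if end_ % 2 = 0 then end_ else end_ - 1
     lastEven < firstEven ∨
       (-(data.length : Int) ≤ firstEven ∧ lastEven < (data.length : Int)))
instance (data : List Int) (start : Int) (end_ : Int) : Decidable (Pre_product_rec data start end_) := by unfold Pre_product_rec; infer_instance

def pvWitness_product_rec : List Int × Int × Int := ([3, 4, 6, 5], 0, 3)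

def Spec_product_rec (data : List Int) (start : Int) (end_ : Int) (out : Int) : Prop := out = product_rec_alt data start end_
instance (data : List Int) (start : Int) (end_ : Int) (out : Int) : Decidable (Spec_product_rec data start end_ out) := by unfold Spec_product_rec; infer_instance

-- ===== CLAIM (what is proved, stated in full; the proofs are below) =====
def Claim_equal_product_rec : Prop := ∀ (data : List Int) (start : Int) (end_ : Int), Dom_product_rec data start end_ → Pre_product_rec data start end_ → Spec_product_rec data start end_ (product_rec data start end_)

-- ===== LEMMAS AND PROOFS =====

-- the per-index factor: the element if both index and element are even, else 1
def pvFactor (data : List Int) (i : Int) : Int :=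
  if PySem.Int.mod i 2 = 0 ∧ PySem.Int.mod ((PySem.List.pyGet? data i).getD 1) 2 = 0 then
    (PySem.List.pyGet? data i).getD 1
  else 1

theorem foldl_eq_mul_prod (data : List Int) (l : List Int) (a : Int) :
    l.foldl
      (fun result i =>
        if PySem.Int.mod i 2 = 0 ∧ PySem.Int.mod ((PySem.List.pyGet? data i).getD 1) 2 = 0 then
          result * (PySem.List.pyGet? data i).getD 1
        else result)
      a = a * (l.map (pvFactor data)).prod := by
  induction l generalizing a with
  | nil => simp
  | cons x xs ih =>
    simp only [List.foldl_cons, List.map_cons, List.prod_cons, ih, pvFactor]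
    split_ifs <;> ring

theorem aux_eq_prod (data : List Int) :
    ∀ (fuel : Nat) (s e : Int), s ≤ e → (e - s).toNat < fuel →
      productRecAux data fuel s e = ((PySem.List.pyRange s (e + 1) 1).map (pvFactor data)).prod := by
  intro fuel
  induction fuel with
  | zero => intro s e _ h; omega
  | succ f ih =>
    intro s e hse hf
    by_cases heq : s = e
    · subst heq
      rw [PySem.List.pyRange_one_singleton]
      simp [productRecAux, pvFactor]
    · have hlt : s < e := lt_of_le_of_ne hse heq
      have hmid : PySem.Int.floordiv (s + e) 2 = (s + e) / 2 :=
        PySem.Int.floordiv_eq_ediv_of_pos (by omega)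
      simp only [productRecAux, if_neg heq]
      set m := PySem.Int.floordiv (s + e) 2 with hm
      have hsm : s ≤ m := by omega
      have hme : m < e := by omega
      rw [ih s m hsm (by omega), ih (m + 1) e (by omega) (by omega),
        PySem.List.pyRange_one_append s (m + 1) (e + 1) (by omega) (by omega),
        List.map_append, List.prod_append]

theorem product_rec_eq (data : List Int) (s e : Int) (h : s ≤ e) :
    product_rec data s e = product_rec_alt data s e := by
  unfold product_rec product_rec_alt
  rw [aux_eq_prod data ((e - s).toNat + 1) s e h (by omega),
    foldl_eq_mul_prod, one_mul]

-- ===== VERDICT (by name: the statement is the Claim_ definition above) =====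
theorem product_rec_spec : Claim_equal_product_rec := by
  intro data start end_ _ hpre
  exact product_rec_eq data start end_ hpre.1
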